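-- pv_equiv track=rewrite | github.com/yangzy1202/CCT-2019 | 4-turtle-draw/SOURCE/l-system_3.py | split_path
-- ===== SOURCE A (Python) =====
-- def split_path(path):
--     i = 0
--     list = []
--     while i < len(path):
--         if path[i] == 'F':
--             list.append(path[i:i+2])
--             i += 2
--         else:
--             list.append(path[i])
--             i += 1
--     return list
-- ===== SOURCE B (Python) =====
-- import re
--
-- def split_path(path):
--     # One regex pass: 'F' greedily grabs its optional following char; any
--     # other single char (incl. newline, via DOTALL) is its own token.
--     return re.findall(r'F.?|.', path, re.DOTALL)
-- ===== Notes on version B (the rewrite author's own statement) =====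
-- stated objective: idiomatic
-- what changed: Replaced the manual index-walking while-loop with a single regex findall (r'F.?|.' with DOTALL) that lets the regex engine produce the token list in one call.
import Mathlib
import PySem

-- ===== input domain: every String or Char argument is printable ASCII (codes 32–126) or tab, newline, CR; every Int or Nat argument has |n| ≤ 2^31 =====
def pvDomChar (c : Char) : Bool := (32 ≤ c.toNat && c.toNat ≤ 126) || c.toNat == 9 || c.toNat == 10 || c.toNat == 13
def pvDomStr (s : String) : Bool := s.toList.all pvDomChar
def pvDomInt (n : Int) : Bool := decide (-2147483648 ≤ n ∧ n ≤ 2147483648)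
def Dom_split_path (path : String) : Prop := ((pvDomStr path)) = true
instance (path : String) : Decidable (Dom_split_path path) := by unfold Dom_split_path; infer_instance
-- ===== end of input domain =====

-- B replaces A's manual index-walking loop with a single regex tokenization (same tokens, same cost).

-- ===== PORT A =====
-- A's while-loop over index i; path[i:i+2] is (drop i).take 2, exact for 0 ≤ i
-- (PySem.List.slice_natCast_add), path[i] is in-range indexing.
def split_path_loop (s : List Char) (i : Nat) (acc : List String) : List String :=
  if h : i < s.length then
    if s[i] = 'F' then
      split_path_loop s (i + 2) (acc ++ [String.ofList ((s.drop i).take 2)])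
    else
      split_path_loop s (i + 1) (acc ++ [String.ofList [s[i]]])
  else acc
termination_by s.length - i

def split_path (path : String) : List String :=
  split_path_loop path.toList 0 []

-- ===== PORT B =====
-- Hand port of re.findall(r'F.?|.', path, re.DOTALL): at each position the
-- engine matches 'F' plus (greedily) its optional next char, else any one
-- char; exact on all inputs since the alternatives are a total single-step match.
def split_path_tok : List Char → List String
  | [] => []
  | c :: rest =>
    if c = 'F' then
      match rest with
      | [] => ["F"]
      | d :: rest' => String.ofList ['F', d] :: split_path_tok rest'
    else String.ofList [c] :: split_path_tok rest

def split_path_alt (path : String) : List String :=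
  split_path_tok path.toList

-- ===== PRECONDITION & SPEC =====
def Spec_split_path (path : String) (out : List String) : Prop := out = split_path_alt path
instance (path : String) (out : List String) : Decidable (Spec_split_path path out) := by unfold Spec_split_path; infer_instance

-- ===== CLAIM (what is proved, stated in full; the proofs are below) =====
def Claim_equal_split_path : Prop := ∀ (path : String), Dom_split_path path → Spec_split_path path (split_path path)

-- ===== LEMMAS AND PROOFS =====

theorem split_path_loop_eq (s : List Char) (n i : Nat) (acc : List String)
    (hn : s.length - i ≤ n) :
    split_path_loop s i acc = acc ++ split_path_tok (s.drop i) := by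
  induction n generalizing i acc with
  | zero =>
    have hle : s.length ≤ i := by omega
    rw [split_path_loop]
    simp [Nat.not_lt.mpr hle, List.drop_eq_nil_of_le hle, split_path_tok]
  | succ n ih =>
    rw [split_path_loop]
    by_cases h : i < s.length
    · simp only [h, dif_pos]
      have hdrop : s.drop i = s[i] :: s.drop (i + 1) := List.drop_eq_getElem_cons h
      by_cases hF : s[i] = 'F'
      · simp only [hF, if_pos]
        rw [ih (i + 2) _ (by omega)]
        have h2 : s.drop (i + 2) = (s.drop (i + 1)).drop 1 := by
          rw [List.drop_drop]
        rw [h2, hdrop, hF]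
        cases hrest : s.drop (i + 1) with
        | nil => simp [split_path_tok]
        | cons c rest => simp [split_path_tok]
      · simp only [hF, if_neg, not_false_iff]
        rw [ih (i + 1) _ (by omega)]
        conv_rhs => rw [hdrop, split_path_tok.eq_def]
        simp [hF]
    · have hle : s.length ≤ i := by omega
      simp [h, List.drop_eq_nil_of_le hle, split_path_tok]

-- ===== VERDICT (by name: the statement is the Claim_ definition above) =====
theorem split_path_spec : Claim_equal_split_path := by
  intro path _
  unfold Spec_split_path split_path split_path_alt
  rw [split_path_loop_eq _ path.toList.length 0 [] (by omega)]
  simp
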